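-- pv_equiv track=rewrite | github.com/SinDongHwan/Algorithm | 프로그래머스/unrated/181855. 문자열 묶기/문자열 묶기.py | solution
-- ===== SOURCE A (Python) =====
-- def solution(strArr):
--     answer = 0
--     word_dict = dict()
--     for word in strArr:
--         if word_dict.get(len(word)) is None:
--             word_dict[len(word)] = 1
--         else:
--             word_dict[len(word)] += 1
--
--     answer = max(word_dict.values())
--     return answer
-- ===== SOURCE B (Python) =====
-- def solution(strArr):
--     lengths = sorted(len(w) for w in strArr)
--     best = 0
--     cur = 0
--     prev = None
--     for L in lengths:
--         if prev == L:
--             cur += 1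
--         else:
--             cur = 1
--             prev = L
--         best = max(best, cur)
--     return best
-- ===== Notes on version B (the rewrite author's own statement) =====
-- stated objective: alternative
-- what changed: Replaces the dict-of-counts pass plus max over values by sorting the lengths and scanning consecutive equal runs, tracking the current run and the best run.
import Mathlib
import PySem

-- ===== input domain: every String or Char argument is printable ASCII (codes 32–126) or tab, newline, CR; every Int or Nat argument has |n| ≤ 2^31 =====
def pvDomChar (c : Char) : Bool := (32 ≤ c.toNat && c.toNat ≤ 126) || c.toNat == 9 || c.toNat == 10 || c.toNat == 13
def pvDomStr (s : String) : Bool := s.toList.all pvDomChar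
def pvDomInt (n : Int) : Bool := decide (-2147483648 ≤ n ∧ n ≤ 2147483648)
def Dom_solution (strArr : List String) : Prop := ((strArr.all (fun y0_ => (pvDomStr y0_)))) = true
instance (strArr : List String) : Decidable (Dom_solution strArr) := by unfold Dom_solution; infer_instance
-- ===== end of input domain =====

-- B replaces A's dict of counts + max over values by a sort of the lengths and a
-- run-count scan (alternative algorithm, return value proved equal on nonempty input).

-- ===== PORT A =====
-- literal port: build word_dict counting each length, then max over its values
def solution (strArr : List String) : Int :=
  let wd : PySem.Dict Int Int :=
    strArr.foldl (fun d w =>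
      match d.get? (PySem.Str.len w : Int) with
      | none => d.insert (PySem.Str.len w : Int) 1
      | some v => d.insert (PySem.Str.len w : Int) (v + 1)) PySem.Dict.empty
  -- Python's max(…) raises ValueError on an empty dict: excluded by Pre_solution
  (PySem.List.max? wd.values (fun x => x)).getD 0

-- ===== PORT B =====
-- one step of B's run-count loop: state (best, cur, prev)
def pvStepB (st : Int × Int × Option Int) (L : Int) : Int × Int × Option Int :=
  let (best, cur, prev) := st
  if prev = some L then (max best (cur + 1), cur + 1, prev)
  else (max best 1, 1, some L)

def solution_alt (strArr : List String) : Int :=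
  let lengths := PySem.List.sorted (strArr.map (fun w => (PySem.Str.len w : Int))) (fun x => x) false
  (lengths.foldl pvStepB (0, 0, none)).1

-- ===== PRECONDITION & SPEC =====
-- Pre_ excludes only the empty list, on which Python A raises ValueError (max of an empty dict's values)
def Pre_solution (strArr : List String) : Prop := strArr ≠ []
instance (strArr : List String) : Decidable (Pre_solution strArr) := by unfold Pre_solution; infer_instance
def pvWitness_solution : List String := ["a", "bc", "d"]

def Spec_solution (strArr : List String) (out : Int) : Prop := out = solution_alt strArr
instance (strArr : List String) (out : Int) : Decidable (Spec_solution strArr out) := by unfold Spec_solution; infer_instance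

-- ===== CLAIM (what is proved, stated in full; the proofs are below) =====
def Claim_equal_solution : Prop := ∀ (strArr : List String), Dom_solution strArr → Pre_solution strArr → Spec_solution strArr (solution strArr)

-- ===== LEMMAS AND PROOFS =====

-- "m is the maximum multiplicity of ls" — both programs' results satisfy it
def IsMaxCount (ls : List Int) (m : Int) : Prop :=
  (∃ v ∈ ls, (ls.count v : Int) = m) ∧ ∀ v ∈ ls, (ls.count v : Int) ≤ m

theorem isMaxCount_unique {ls : List Int} {m m' : Int}
    (h : IsMaxCount ls m) (h' : IsMaxCount ls m') : m = m' := by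
  obtain ⟨⟨v, hv, hvm⟩, hub⟩ := h
  obtain ⟨⟨v', hv', hvm'⟩, hub'⟩ := h'
  have := hub' v hv; have := hub v' hv'; omega

theorem isMaxCount_perm {ls ls' : List Int} {m : Int} (hp : ls.Perm ls')
    (h : IsMaxCount ls m) : IsMaxCount ls' m := by
  obtain ⟨⟨v, hv, hvm⟩, hub⟩ := h
  refine ⟨⟨v, hp.mem_iff.1 hv, by rw [← hp.count_eq]; exact hvm⟩, fun w hw => ?_⟩
  rw [← hp.count_eq]; exact hub w (hp.mem_iff.2 hw)

-- A's dict loop is the Counter fold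
theorem solution_eq_counter_max (strArr : List String) :
    solution strArr =
      (PySem.List.max? (PySem.Dict.counter (strArr.map (fun w => (PySem.Str.len w : Int)))).values
        (fun x => x)).getD 0 := by
  have hfold : (strArr.foldl (fun d w =>
      match d.get? (PySem.Str.len w : Int) with
      | none => d.insert (PySem.Str.len w : Int) 1
      | some v => d.insert (PySem.Str.len w : Int) (v + 1)) (PySem.Dict.empty : PySem.Dict Int Int))
      = PySem.Dict.counter (strArr.map (fun w => (PySem.Str.len w : Int))) := by
    rw [← PySem.Dict.foldl_insert_getD_add_one_eq_counter, List.foldl_map]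
    apply PySem.List.foldl_congr_mem
    intro d w _
    rw [PySem.Dict.getD_eq_get?_getD]; cases d.get? ((PySem.Str.len w : Int)) <;> simp
  unfold solution
  simp only [hfold]

-- the max over the Counter's values is the max multiplicity
theorem counter_max_isMaxCount (ls : List Int) (h : ls ≠ []) :
    IsMaxCount ls (((PySem.List.max? (PySem.Dict.counter ls).values (fun x => x)).getD 0 : Int)) := by
  have hvals : (PySem.Dict.counter ls).values
      = (PySem.Set.ofList ls).map (fun k => (ls.count k : Int)) := by
    simp [PySem.Dict.values, PySem.Dict.items_counter, List.map_map]
  have hne : (PySem.Dict.counter ls).values ≠ [] := by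
    rw [hvals]
    simp only [ne_eq, List.map_eq_nil_iff]
    intro hsets
    obtain ⟨x, hx⟩ := List.exists_mem_of_ne_nil ls h
    have := (PySem.Set.mem_ofList ls x).2 hx
    simp [hsets] at this
  obtain ⟨m, hm⟩ : ∃ m, PySem.List.max? (PySem.Dict.counter ls).values (fun x => x) = some m := by
    cases hmax : PySem.List.max? (PySem.Dict.counter ls).values (fun x => x) with
    | none => exact absurd ((PySem.List.max?_eq_none_iff _ _).1 hmax) hne
    | some m => exact ⟨m, rfl⟩
  rw [hm]
  constructor
  · have := PySem.List.max?_mem hm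
    rw [hvals] at this
    obtain ⟨k, hk, hkm⟩ := List.mem_map.1 this
    exact ⟨k, ((PySem.Set.mem_ofList _ _).1 hk), hkm⟩
  · intro v hv
    have hmem : (ls.count v : Int) ∈ (PySem.Dict.counter ls).values := by
      rw [hvals]
      exact List.mem_map.2 ⟨v, ((PySem.Set.mem_ofList _ _).2 hv), rfl⟩
    simpa using PySem.List.max?_isMax hm _ hmem

-- A's value is the max multiplicity of the length list
theorem solution_isMaxCount (strArr : List String) (h : strArr ≠ []) :
    IsMaxCount (strArr.map (fun w => (PySem.Str.len w : Int))) (solution strArr) := by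
  rw [solution_eq_counter_max]
  exact counter_max_isMaxCount _ (by simpa using h)

-- B's scan invariant on a sorted list
theorem scanB_invariant (t : List Int) (hs : t.Pairwise (· ≤ ·)) :
    (t.foldl pvStepB (0, 0, none)).2.2 = t.getLast? ∧
    (t.foldl pvStepB (0, 0, none)).2.1 =
      (match t.getLast? with | none => 0 | some L => (t.count L : Int)) ∧
    (t = [] → (t.foldl pvStepB (0, 0, none)).1 = 0) ∧
    (t ≠ [] → IsMaxCount t (t.foldl pvStepB (0, 0, none)).1) := by
  induction t using List.reverseRecOn with
  | nil => simp
  | append_singleton t x ih =>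
    have ht : t.Pairwise (· ≤ ·) := (List.pairwise_append.1 hs).1
    have hx : ∀ y ∈ t, y ≤ x := by
      intro y hy
      exact (List.pairwise_append.1 hs).2.2 y hy x (by simp)
    obtain ⟨hp, hc, hb0, hbm⟩ := ih ht
    rw [List.foldl_append]
    rcases eq_or_ne t [] with rfl | htne
    · simp [pvStepB, IsMaxCount]
    · obtain ⟨L, hL⟩ : ∃ L, t.getLast? = some L := by
        cases h : t.getLast? with
        | none => exact absurd (List.getLast?_eq_none_iff.1 h) htne
        | some L => exact ⟨L, rfl⟩
      obtain ⟨t', rfl⟩ : ∃ t', t = t' ++ [L] := by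
        rcases List.getLast?_eq_some_iff.1 hL with ⟨t', h'⟩; exact ⟨t', h'⟩
      set st := (t' ++ [L]).foldl pvStepB (0, 0, none) with hst
      obtain ⟨b, c, p⟩ := st
      simp only at hp hc hb0 hbm
      rw [hL] at hp hc; subst hp
      obtain ⟨hex, hub⟩ := hbm htne
      have hcL : c = (((t' ++ [L]).count L : Nat) : Int) := hc
      have hLmem : L ∈ t' ++ [L] := by simp
      by_cases hLx : L = x
      · subst hLx
        have hcount : ((t' ++ [L]) ++ [L]).count L = (t' ++ [L]).count L + 1 := by
          simp [List.count_append]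
        simp only [List.foldl_cons, List.foldl_nil, pvStepB]
        rw [if_true]
        refine ⟨by simp, ?_, by simp, fun _ => ⟨?_, ?_⟩⟩
        · simp only [List.getLast?_concat, hcount, hcL]; push_cast; ring
        · -- exists witness
          by_cases hbc : c + 1 ≤ b
          · obtain ⟨v, hv, hvb⟩ := hex
            have hvL : v ≠ L := by
              intro rfl; rw [hcL] at hbc; omega
            refine ⟨v, List.mem_append_left _ hv, ?_⟩
            have : ((t' ++ [L]) ++ [L]).count v = (t' ++ [L]).count v := by
              simp [List.count_append, List.count_nil, Ne.symm hvL]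
            rw [this, hvb]; omega
          · refine ⟨L, by simp, ?_⟩
            rw [hcount, hcL]; push_cast; omega
        · intro v hv
          by_cases hvL : v = L
          · subst hvL; rw [hcount, hcL]; push_cast; omega
          · have hvmem : v ∈ t' ++ [L] := by
              rcases List.mem_append.1 hv with h | h
              · exact h
              · simp at h; exact absurd h hvL
            have : (((t' ++ [L]) ++ [L]).count v : Int) = ((t' ++ [L]).count v : Int) := by
              simp [List.count_append, List.count_nil, Ne.symm hvL]
            rw [this]
            exact le_trans (hub v hvmem) (le_max_left _ _)
      · -- last element differs: x is fresh
        have hxnot : x ∉ t' ++ [L] := by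
          intro hxm
          have h1 : x ≤ L := by
            rcases List.mem_append.1 hxm with h | h
            · exact (List.pairwise_append.1 ht).2.2 x h L (by simp)
            · simp at h; exact le_of_eq h
          have h2 : L ≤ x := hx L hLmem
          exact hLx (le_antisymm h2 h1)
        have hb1 : 1 ≤ b := by
          obtain ⟨v, hv, hvb⟩ := hex
          have : 0 < (t' ++ [L]).count v := List.count_pos_iff.2 hv
          omega
        have hpne : (some L : Option Int) ≠ some x := by simpa using hLx
        simp only [List.foldl_cons, List.foldl_nil, pvStepB]
        rw [if_neg hpne]
        refine ⟨by simp, ?_, by simp, fun _ => ⟨?_, ?_⟩⟩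
        · have : ((t' ++ [L]) ++ [x]).count x = 1 := by
            have h1 : t'.count x = 0 := List.count_eq_zero_of_not_mem (fun h => hxnot (List.mem_append_left _ h))
            have h2 : L ≠ x := fun h => hxnot (by simp [h])
            simp [List.count_append, h1, h2]
          simp only [List.getLast?_concat, this]
          norm_num
        · obtain ⟨v, hv, hvb⟩ := hex
          have hvx : v ≠ x := fun h => hxnot (h ▸ hv)
          refine ⟨v, List.mem_append_left _ hv, ?_⟩
          have : ((t' ++ [L]) ++ [x]).count v = (t' ++ [L]).count v := by
            simp [List.count_append, List.count_cons, List.count_nil, Ne.symm hvx]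
          rw [this, hvb]; omega
        · intro v hv
          by_cases hvx : v = x
          · subst hvx
            have h1 : t'.count v = 0 := List.count_eq_zero_of_not_mem (fun h => hxnot (List.mem_append_left _ h))
            have h2 : L ≠ v := fun h => hxnot (by simp [h])
            have hcx : ((t' ++ [L]) ++ [v]).count v = 1 := by
              simp [List.count_append, h1, h2]
            rw [hcx]; push_cast; omega
          · have hvmem : v ∈ t' ++ [L] := by
              rcases List.mem_append.1 hv with h | h
              · exact h
              · simp at h; exact absurd h hvx
            have : (((t' ++ [L]) ++ [x]).count v : Int) = ((t' ++ [L]).count v : Int) := by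
              simp [List.count_append, List.count_cons, List.count_nil, Ne.symm hvx]
            rw [this]
            exact le_trans (hub v hvmem) (le_max_left _ _)

-- B's value is the max multiplicity of the length list
theorem solution_alt_isMaxCount (strArr : List String) (h : strArr ≠ []) :
    IsMaxCount (strArr.map (fun w => (PySem.Str.len w : Int))) (solution_alt strArr) := by
  unfold solution_alt
  set ls := strArr.map (fun w => (PySem.Str.len w : Int)) with hls
  have hperm : (PySem.List.sorted ls (fun x => x) false).Perm ls := PySem.List.sorted_perm ls _ _
  have hpw : (PySem.List.sorted ls (fun x => x) false).Pairwise (· ≤ ·) := by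
    have := PySem.List.sorted_pairwise ls (fun x => x)
    simpa using this
  have hne : PySem.List.sorted ls (fun x => x) false ≠ [] := by
    rw [ne_eq, PySem.List.sorted_eq_nil_iff]
    simpa [hls] using h
  exact isMaxCount_perm hperm ((scanB_invariant _ hpw).2.2.2 hne)

-- ===== VERDICT (by name: the statement is the Claim_ definition above) =====
theorem solution_spec : Claim_equal_solution := by
  intro strArr _ hpre
  unfold Spec_solution
  exact isMaxCount_unique (solution_isMaxCount strArr hpre) (solution_alt_isMaxCount strArr hpre)
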